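-- pv_equiv track=rewrite | github.com/ricable/ultimate-ai-agent | sources/ricable/uap/backend/human_ai/explanation_generator.py | _simplify_jargon
-- ===== SOURCE A (Python) =====
-- def _simplify_jargon(explanation: str) -> str:
--     """Replace jargon with simpler terms"""
--     replacements = {
--         "algorithm": "method",
--         "optimize": "improve",
--         "parameter": "setting",
--         "correlation": "relationship",
--         "probability": "chance",
--         "variance": "variation",
--         "inference": "conclusion"
--     }
--
--     for jargon, simple in replacements.items():
--         explanation = explanation.replace(jargon, simple)
--
--     return explanation
-- ===== SOURCE B (Python) =====
-- # Single left-to-right scan driven by a rule table, instead of seven sequential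
-- # full-string .replace() passes.  At each position the first matching jargon key
-- # is emitted as its simple synonym and skipped; replacements are never rescanned,
-- # so a replacement can never be turned into further jargon.
-- _RULES = [
--     ("algorithm", "method"),
--     ("optimize", "improve"),
--     ("parameter", "setting"),
--     ("correlation", "relationship"),
--     ("probability", "chance"),
--     ("variance", "variation"),
--     ("inference", "conclusion"),
-- ]
--
--
-- def _simplify_jargon(explanation: str) -> str:
--     """Replace jargon with simpler terms"""
--     out = []
--     i = 0
--     n = len(explanation)
--     while i < n:
--         for jargon, simple in _RULES:
--             if explanation.startswith(jargon, i):
--                 out.append(simple)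
--                 i += len(jargon)
--                 break
--         else:
--             out.append(explanation[i])
--             i += 1
--     return "".join(out)
-- ===== Notes on version B (the rewrite author's own statement) =====
-- stated objective: alternative
-- what changed: Seven sequential full-string replace passes are replaced by one left-to-right scan over a rule table that emits the first matching key's synonym and never rescans emitted replacements.
-- intended difference: On inputs containing the substring 'correlationrobability', A's cascaded replaces first produce '...relationship'+'robability...' and then wrongly replace the 'probability' that straddles the boundary (yielding '...relationshichance...'), while B leaves the original text's 'robability' alone (yielding '...relationshiprobability...'), which is the intended behaviour since that 'probability' never occurred in the input. — e.g. on _simplify_jargon("correlationrobability"): A returns "relationshichance", B returns "relationshiprobability"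
import Mathlib
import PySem

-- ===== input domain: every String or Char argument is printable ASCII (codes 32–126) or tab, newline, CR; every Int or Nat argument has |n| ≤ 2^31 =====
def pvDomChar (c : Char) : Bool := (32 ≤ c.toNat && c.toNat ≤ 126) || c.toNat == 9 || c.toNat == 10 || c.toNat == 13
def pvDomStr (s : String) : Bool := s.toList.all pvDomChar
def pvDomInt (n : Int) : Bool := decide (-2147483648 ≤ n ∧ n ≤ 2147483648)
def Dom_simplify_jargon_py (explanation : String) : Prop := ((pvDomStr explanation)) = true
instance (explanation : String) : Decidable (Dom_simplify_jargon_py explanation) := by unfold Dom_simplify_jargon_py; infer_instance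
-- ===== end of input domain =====

-- B replaces A's seven sequential full-string replace passes by one left-to-right
-- table-driven scan (objective: alternative); on inputs containing
-- "correlationrobability" A's cascade manufactures and replaces a "probability"
-- that never occurred in the input — B intentionally differs there (see D_ below).

-- ===== PORT A =====
def simplify_jargon_py (explanation : String) : String :=
  let replacements : PySem.Dict String String :=
    PySem.Dict.mk [("algorithm", "method"), ("optimize", "improve"),
      ("parameter", "setting"), ("correlation", "relationship"),
      ("probability", "chance"), ("variance", "variation"),
      ("inference", "conclusion")]
  replacements.items.foldl (fun e p => PySem.Str.replace e p.1 p.2) explanation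

-- ===== PORT B =====
def pvRules : List (String × String) :=
  [("algorithm", "method"), ("optimize", "improve"),
   ("parameter", "setting"), ("correlation", "relationship"),
   ("probability", "chance"), ("variance", "variation"),
   ("inference", "conclusion")]

-- the inner `for … break/else` of Source B: first rule whose key starts at the scan position
def pvFindRule (rules : List (String × String)) (s : List Char) : Option (String × String) :=
  rules.find? (fun p => p.1.toList.isPrefixOf s)

-- the `while i < n` loop of Source B; fuel = an upper bound on the characters left to consume
def pvScan (rules : List (String × String)) : Nat → List Char → List Char
  | _, [] => []
  | 0, s => s
  | fuel + 1, c :: t =>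
    match pvFindRule rules (c :: t) with
    | some p => p.2.toList ++ pvScan rules fuel ((c :: t).drop p.1.toList.length)
    | none => c :: pvScan rules fuel t

def simplify_jargon_py_alt (explanation : String) : String :=
  String.ofList (pvScan pvRules explanation.toList.length explanation.toList)

-- ===== PRECONDITION & SPEC =====
-- On inputs containing "correlationrobability", A returns "…relationshichance…"
-- (its fourth pass rewrites "correlation"→"relationship" and the fifth pass then
-- replaces the "probability" that straddles the new boundary), while B returns
-- "…relationshiprobability…"; B's value is intended, since no "probability"
-- occurs in the input.
def D_simplify_jargon_py (explanation : String) : Prop :=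
  PySem.Str.isIn "correlationrobability" explanation = true
instance (explanation : String) : Decidable (D_simplify_jargon_py explanation) := by
  unfold D_simplify_jargon_py; infer_instance

def Spec_simplify_jargon_py (explanation : String) (out : String) : Prop :=
  ¬ D_simplify_jargon_py explanation → out = simplify_jargon_py_alt explanation
instance (explanation : String) (out : String) : Decidable (Spec_simplify_jargon_py explanation out) := by
  unfold Spec_simplify_jargon_py; infer_instance

def pvDiffWitness_simplify_jargon_py : String := "correlationrobability"
def pvDiffWitnessOut_simplify_jargon_py : String × String :=
  ("relationshichance", "relationshiprobability")

-- ===== CLAIM (what is proved, stated in full; the proofs are below) =====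
def Claim_unchanged_simplify_jargon_py : Prop := ∀ (explanation : String), Dom_simplify_jargon_py explanation → Spec_simplify_jargon_py explanation (simplify_jargon_py explanation)
def Claim_changed_simplify_jargon_py : Prop := Dom_simplify_jargon_py (pvDiffWitness_simplify_jargon_py) ∧ D_simplify_jargon_py (pvDiffWitness_simplify_jargon_py) ∧ simplify_jargon_py (pvDiffWitness_simplify_jargon_py) = pvDiffWitnessOut_simplify_jargon_py.1 ∧ simplify_jargon_py_alt (pvDiffWitness_simplify_jargon_py) = pvDiffWitnessOut_simplify_jargon_py.2 ∧ pvDiffWitnessOut_simplify_jargon_py.1 ≠ pvDiffWitnessOut_simplify_jargon_py.2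
def Claim_exact_simplify_jargon_py : Prop := ∀ (explanation : String), Dom_simplify_jargon_py explanation → D_simplify_jargon_py explanation → simplify_jargon_py explanation ≠ simplify_jargon_py_alt explanation

-- ===== LEMMAS AND PROOFS =====

def pvRepl (old new : List Char) : List Char → List Char
  | [] => []
  | c :: t =>
    if h : old ≠ [] ∧ old.isPrefixOf (c :: t) then
      new ++ pvRepl old new ((c :: t).drop old.length)
    else c :: pvRepl old new t
  termination_by s => s.length
  decreasing_by
    · have : 0 < old.length := List.length_pos_iff.mpr h.1
      simp only [List.length_drop, List.length_cons]
      omega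
    · simp

lemma pv_go_spec (old new : List Char) (hold : old ≠ []) :
    ∀ fuel l acc, l.length ≤ fuel →
      PySem.Chars.replace.go old new fuel l acc = acc.reverse ++ pvRepl old new l := by
  intro fuel
  induction fuel with
  | zero =>
    intro l acc hl
    have : l = [] := List.length_eq_zero_iff.mp (Nat.le_zero.mp hl)
    subst this
    simp [PySem.Chars.replace.go, pvRepl]
  | succ f ih =>
    intro l acc hl
    cases l with
    | nil => simp [PySem.Chars.replace.go, pvRepl]
    | cons c t =>
      rw [PySem.Chars.replace.go]
      by_cases hp : old.isPrefixOf (c :: t)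
      · rw [if_pos hp]
        have hlen : 0 < old.length := List.length_pos_iff.mpr hold
        have : ((c :: t).drop old.length).length ≤ f := by
          simp only [List.length_drop, List.length_cons]
          simp only [List.length_cons] at hl
          omega
        rw [ih _ _ this, pvRepl, dif_pos ⟨hold, hp⟩]
        simp
      · rw [if_neg hp]
        have : t.length ≤ f := by simpa using hl
        rw [ih _ _ this, pvRepl, dif_neg (by simp [hp])]
        simp

lemma pv_replace_eq_pvRepl (old new s : List Char) (h : old ≠ []) :
    PySem.Chars.replace s old new = pvRepl old new s := by
  rw [PySem.Chars.replace]
  rw [if_neg (by simpa using h)]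
  simpa using pv_go_spec old new h s.length s [] le_rfl

lemma pvRepl_append (ki ri a u : List Char)
    (h : ∀ a₂ ∈ a.tails, a₂ ≠ [] → ¬ (ki <+: a₂ ++ u)) :
    pvRepl ki ri (a ++ u) = a ++ pvRepl ki ri u := by
  induction a with
  | nil => rfl
  | cons c a' ih =>
    rw [List.cons_append, pvRepl]
    rw [dif_neg]
    · have ih' := ih (fun a₂ ha₂ hne =>
        h a₂ (by rw [List.tails_cons]; exact List.mem_cons_of_mem _ ha₂) hne)
      rw [ih']
      rfl
    · rintro ⟨-, hp⟩
      rw [List.isPrefixOf_iff_prefix] at hp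
      exact h (c :: a') (by simp) (by simp) (by simpa using hp)

lemma pvRepl_head (ki ri u : List Char) (h : ki ≠ []) :
    pvRepl ki ri (ki ++ u) = ri ++ pvRepl ki ri u := by
  cases hk : ki with
  | nil => exact absurd hk h
  | cons k0 kt =>
    rw [← hk, hk, List.cons_append, pvRepl, dif_pos]
    · rw [← List.cons_append, ← hk, List.drop_left]
    · refine ⟨by simp [hk], ?_⟩
      rw [List.isPrefixOf_iff_prefix]
      exact (by rw [← List.cons_append, ← hk]; exact List.prefix_append ki u)



lemma pv_find_mem_pred {rules : List (String × String)} {s : List Char} {p : String × String}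
    (h : pvFindRule rules s = some p) : p ∈ rules ∧ p.1.toList <+: s := by
  refine ⟨List.mem_of_find?_eq_some h, ?_⟩
  have := List.find?_some h
  simpa [List.isPrefixOf_iff_prefix] using this


lemma pvScan_fuel (rules : List (String × String))
    (hne : ∀ p ∈ rules, p.1.toList ≠ []) :
    ∀ f s g, s.length ≤ f → s.length ≤ g → pvScan rules f s = pvScan rules g s := by
  intro f
  induction f with
  | zero =>
    intro s g hf hg
    have : s = [] := List.length_eq_zero_iff.mp (Nat.le_zero.mp hf)
    subst this
    cases g <;> simp [pvScan]
  | succ f ih =>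
    intro s g hf hg
    cases s with
    | nil => cases g <;> simp [pvScan]
    | cons c t =>
      cases g with
      | zero => simp at hg
      | succ g' =>
        simp only [pvScan]
        cases hfind : pvFindRule rules (c :: t) with
        | none =>
          dsimp only
          have : t.length ≤ f := by simpa using hf
          have h2 : t.length ≤ g' := by simpa using hg
          rw [ih t g' this h2]
        | some p =>
          dsimp only
          obtain ⟨hmem, hpre⟩ := pv_find_mem_pred hfind
          have hk : 0 < p.1.toList.length := List.length_pos_iff.mpr (hne p hmem)
          have hless : ((c :: t).drop p.1.toList.length).length ≤ f := by
            simp only [List.length_drop, List.length_cons]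
            simp only [List.length_cons] at hf
            omega
          have hless2 : ((c :: t).drop p.1.toList.length).length ≤ g' := by
            simp only [List.length_drop, List.length_cons]
            simp only [List.length_cons] at hg
            omega
          rw [ih _ g' hless hless2]

def pvSC (rules : List (String × String)) (s : List Char) : List Char :=
  pvScan rules s.length s

lemma pvSC_match (rules : List (String × String))
    (hne : ∀ p ∈ rules, p.1.toList ≠ []) {s : List Char} {p : String × String}
    (h : pvFindRule rules s = some p) (hs : s ≠ []) :
    pvSC rules s = p.2.toList ++ pvSC rules (s.drop p.1.toList.length) := by
  obtain ⟨hmem, hpre⟩ := pv_find_mem_pred h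
  have hk : 0 < p.1.toList.length := List.length_pos_iff.mpr (hne p hmem)
  cases s with
  | nil => simp at hs
  | cons c t =>
    show pvScan rules (t.length + 1) (c :: t) = _
    simp only [pvScan, h]
    congr 1
    apply pvScan_fuel rules hne
    · simp only [List.length_drop, List.length_cons]; omega
    · exact le_rfl

lemma pvSC_nomatch (rules : List (String × String)) {c : Char} {t : List Char}
    (h : pvFindRule rules (c :: t) = none) :
    pvSC rules (c :: t) = c :: pvSC rules t := by
  show pvScan rules (t.length + 1) (c :: t) = _
  simp only [pvScan, h]
  rfl

lemma pvSC_nilrules : ∀ s, pvSC [] s = s := by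
  intro s
  induction s with
  | nil => rfl
  | cons c t ih =>
    rw [pvSC_nomatch [] (by simp [pvFindRule]), ih]

lemma pv_prefix_append_cases {α : Type} {l a u : List α} (h : l <+: a ++ u) :
    l <+: a ∨ a <+: l := by
  induction a generalizing l with
  | nil => exact Or.inr (List.nil_prefix)
  | cons x a' ih =>
    cases l with
    | nil => exact Or.inl List.nil_prefix
    | cons y l' =>
      rw [List.cons_append, List.cons_prefix_cons] at h
      rcases h with ⟨rfl, h2⟩
      rcases ih h2 with h3 | h3
      · exact Or.inl (List.cons_prefix_cons.mpr ⟨rfl, h3⟩)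
      · exact Or.inr (List.cons_prefix_cons.mpr ⟨rfl, h3⟩)

lemma pvSC_append (rules : List (String × String))
    (hne : ∀ p ∈ rules, p.1.toList ≠ []) (a u : List Char)
    (ha : ∀ g ∈ a.tails, g ≠ [] → ∀ p ∈ rules, ¬ (p.1.toList <+: g) ∧ ¬ (g <+: p.1.toList)) :
    pvSC rules (a ++ u) = a ++ pvSC rules u := by
  induction a with
  | nil => rfl
  | cons c a' ih =>
    have hfind : pvFindRule rules ((c :: a') ++ u) = none := by
      rw [pvFindRule, List.find?_eq_none]
      intro p hp
      simp only [List.isPrefixOf_iff_prefix]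
      intro hpre
      have hg := ha (c :: a') (by simp) (by simp) p hp
      rcases pv_prefix_append_cases hpre with h1 | h1
      · exact hg.1 h1
      · exact hg.2 h1
    have ih' := ih (fun g hg hgne p hp =>
      ha g (by rw [List.tails_cons]; exact List.mem_cons_of_mem _ hg) hgne p hp)
    rw [List.cons_append,
      pvSC_nomatch rules (c := c) (t := a' ++ u) (by exact hfind), ih']
    rfl

lemma pvSC_prefix_lift (rules : List (String × String))
    (hne : ∀ p ∈ rules, p.1.toList ≠ []) (ki : List Char)
    (hKR : ∀ p ∈ rules, ∀ g ∈ ki.tails, g ≠ [] → g ≠ ki →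
      ¬ (p.2.toList <+: g) ∧ ¬ (g <+: p.2.toList)) :
    ∀ t g, g <:+ ki → g ≠ [] → g ≠ ki → g <+: pvSC rules t → g <+: t := by
  intro t
  induction hn : t.length using Nat.strong_induction_on generalizing t with
  | _ n ih =>
  intro g hsfx hgne hgki hpre
  cases t with
  | nil =>
    simp only [pvSC, pvScan] at hpre
    exact absurd (List.prefix_nil.mp hpre) hgne
  | cons c t₂ =>
    cases hf : pvFindRule rules (c :: t₂) with
    | some p =>
      obtain ⟨hmem, -⟩ := pv_find_mem_pred hf
      rw [pvSC_match rules hne hf (by simp)] at hpre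
      have hg := hKR p hmem g ((List.mem_tails g ki).mpr hsfx) hgne hgki
      rcases pv_prefix_append_cases hpre with h1 | h1
      · exact absurd h1 hg.2
      · exact absurd h1 hg.1
    | none =>
      rw [pvSC_nomatch rules hf] at hpre
      cases g with
      | nil => exact absurd rfl hgne
      | cons y g' =>
        rw [List.cons_prefix_cons] at hpre
        obtain ⟨rfl, hg'⟩ := hpre
        by_cases hg'nil : g' = []
        · subst hg'nil
          exact List.cons_prefix_cons.mpr ⟨rfl, List.nil_prefix⟩
        · have hsfx' : g' <:+ ki := (List.suffix_cons y g').trans hsfx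
          have hki : g' ≠ ki := by
            intro hEq
            have h1 : (y :: g').length ≤ ki.length := List.IsSuffix.length_le hsfx
            rw [← hEq] at h1
            simp at h1
          have := ih t₂.length (by simp [← hn]) t₂ rfl g' hsfx' hg'nil hki hg'
          exact List.cons_prefix_cons.mpr ⟨rfl, this⟩

lemma pv_step (ps : List (String × String)) (ki ri : String) (G : List Char → Prop)
    (hki : ki.toList ≠ [])
    (hpsne : ∀ p ∈ ps, p.1.toList ≠ [])
    (hGsfx : ∀ s t, t <:+ s → G s → G t)
    (hKK : ∀ p ∈ ps, ∀ g ∈ ki.toList.tails, g ≠ [] →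
      ¬ (p.1.toList <+: g) ∧ ¬ (g <+: p.1.toList))
    (hKR : ∀ p ∈ ps, ∀ g ∈ ki.toList.tails, g ≠ [] → g ≠ ki.toList →
      ¬ (p.2.toList <+: g) ∧ ¬ (g <+: p.2.toList))
    (hRK : ∀ p ∈ ps, ∀ a ∈ p.2.toList.tails, a ≠ [] → ¬ (ki.toList <+: a))
    (hCrit : ∀ p ∈ ps, ∀ t, G (p.1.toList ++ t) → ∀ a ∈ p.2.toList.tails, a ≠ [] →
      a <+: ki.toList → ¬ (ki.toList.drop a.length <+: t)) :
    ∀ s, G s → pvRepl ki.toList ri.toList (pvSC ps s) = pvSC (ps ++ [(ki, ri)]) s := by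
  have hpsne2 : ∀ q ∈ ps ++ [(ki, ri)], q.1.toList ≠ [] := by
    intro q hq
    rcases List.mem_append.mp hq with h | h
    · exact hpsne q h
    · simp only [List.mem_singleton] at h
      subst h
      exact hki
  intro s
  induction hn : s.length using Nat.strong_induction_on generalizing s with
  | _ n ih =>
  intro hG
  cases hf : pvFindRule ps s with
  | some p =>
    obtain ⟨hmem, hpre⟩ := pv_find_mem_pred hf
    have hsne : s ≠ [] := by
      intro hEq
      subst hEq
      exact hpsne p hmem (List.prefix_nil.mp hpre)
    have hfind2 : pvFindRule (ps ++ [(ki, ri)]) s = some p := by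
      simp only [pvFindRule] at hf ⊢
      rw [List.find?_append, hf]
      rfl
    rw [pvSC_match ps hpsne hf hsne, pvSC_match (ps ++ [(ki, ri)]) hpsne2 hfind2 hsne]
    have hs_eq : p.1.toList ++ s.drop p.1.toList.length = s := List.prefix_iff_eq_append.mp hpre
    rw [pvRepl_append ki.toList ri.toList p.2.toList (pvSC ps (s.drop p.1.toList.length)) ?noppre]
    case noppre =>
      intro a₂ ha₂ hane hkipre
      rcases pv_prefix_append_cases hkipre with h1 | h1
      · exact hRK p hmem a₂ ha₂ hane h1
      · by_cases heq : a₂ = ki.toList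
        · exact hRK p hmem a₂ ha₂ hane (by rw [heq])
        · have hlt : a₂.length < ki.toList.length :=
            lt_of_le_of_ne h1.length_le (fun hl => heq (List.IsPrefix.eq_of_length h1 hl))
          have ha2pos : 0 < a₂.length := List.length_pos_iff.mpr hane
          have hsplit : a₂ ++ ki.toList.drop a₂.length = ki.toList :=
            List.prefix_iff_eq_append.mp h1
          rw [← hsplit] at hkipre
          have hdrop : ki.toList.drop a₂.length <+: pvSC ps (s.drop p.1.toList.length) :=
            (List.prefix_append_right_inj a₂).mp hkipre
          have hg2 : ki.toList.drop a₂.length <+: s.drop p.1.toList.length :=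
            pvSC_prefix_lift ps hpsne ki.toList hKR _ _ (List.drop_suffix _ _)
              (by simp only [ne_eq, List.drop_eq_nil_iff]; omega)
              (by intro hEq; have hlen := congrArg List.length hEq;
                  rw [List.length_drop] at hlen; omega)
              hdrop
          exact hCrit p hmem (s.drop p.1.toList.length) (by rw [hs_eq]; exact hG)
            a₂ ha₂ hane h1 hg2
    congr 1
    have hk : 0 < p.1.toList.length := List.length_pos_iff.mpr (hpsne p hmem)
    have hspos : 0 < s.length := List.length_pos_iff.mpr hsne
    exact ih (s.drop p.1.toList.length).length
      (by simp only [List.length_drop]; omega) _ rfl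
      (hGsfx s _ (List.drop_suffix _ _) hG)
  | none =>
    by_cases hkp : ki.toList <+: s
    · have hs_eq : ki.toList ++ s.drop ki.toList.length = s := List.prefix_iff_eq_append.mp hkp
      have hsne : s ≠ [] := by
        intro hEq
        subst hEq
        exact hki (List.prefix_nil.mp hkp)
      have hfind2 : pvFindRule (ps ++ [(ki, ri)]) s = some (ki, ri) := by
        simp only [pvFindRule] at hf ⊢
        rw [List.find?_append, hf]
        simp [List.isPrefixOf_iff_prefix, hkp]
      rw [pvSC_match (ps ++ [(ki, ri)]) hpsne2 hfind2 hsne]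
      conv_lhs => rw [← hs_eq]
      rw [pvSC_append ps hpsne ki.toList _ (fun g hg hgne p hp => hKK p hp g hg hgne)]
      rw [pvRepl_head _ _ _ hki]
      congr 1
      have hk : 0 < ki.toList.length := List.length_pos_iff.mpr hki
      have hspos : 0 < s.length := List.length_pos_iff.mpr hsne
      exact ih (s.drop ki.toList.length).length
        (by simp only [List.length_drop]; omega) _ rfl
        (hGsfx s _ (List.drop_suffix _ _) hG)
    · cases s with
      | nil => simp [pvSC, pvScan, pvRepl]
      | cons c t =>
        have hfind2 : pvFindRule (ps ++ [(ki, ri)]) (c :: t) = none := by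
          simp only [pvFindRule] at hf ⊢
          rw [List.find?_append, hf]
          simp only [Option.none_or]
          simp [List.isPrefixOf_iff_prefix, hkp]
        rw [pvSC_nomatch ps hf, pvSC_nomatch _ hfind2, pvRepl, dif_neg ?nopre]
        case nopre =>
          rintro ⟨-, hp⟩
          rw [List.isPrefixOf_iff_prefix] at hp
          cases hk : ki.toList with
          | nil => exact hki hk
          | cons k0 w =>
            rw [hk, List.cons_prefix_cons] at hp
            obtain ⟨rfl, hw⟩ := hp
            by_cases hwnil : w = []
            · subst hwnil
              exact hkp (by rw [hk]; exact List.cons_prefix_cons.mpr ⟨rfl, List.nil_prefix⟩)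
            · have hwsfx : w <:+ ki.toList := by rw [hk]; exact List.suffix_cons k0 w
              have hwki : w ≠ ki.toList := by
                intro hEq
                have := congrArg List.length hEq
                rw [hk] at this
                simp at this
              have := pvSC_prefix_lift ps hpsne ki.toList hKR t w hwsfx hwnil hwki hw
              exact hkp (by rw [hk]; exact List.cons_prefix_cons.mpr ⟨rfl, this⟩)
        simp only [List.cons.injEq, true_and]
        exact ih t.length (by simp [← hn]) t rfl (hGsfx (c :: t) t (List.suffix_cons c t) hG)

def pvPat : List Char := "correlationrobability".toList

-- ===== NEW MACHINERY =====
def pvR3 : List (String × String) :=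
  [("algorithm", "method"), ("optimize", "improve"), ("parameter", "setting")]
def pvR4 : List (String × String) := pvR3 ++ [("correlation", "relationship")]
def pvR6 : List (String × String) :=
  pvR3 ++ [("correlationrobability", "relationshichance"),
    ("correlation", "relationship"), ("probability", "chance")]
def pvRules8 : List (String × String) :=
  pvR3 ++ [("correlationrobability", "relationshichance"),
    ("correlation", "relationship"), ("probability", "chance"),
    ("variance", "variation"), ("inference", "conclusion")]

lemma pv_not_prefix_append {k a : List Char} (h1 : ¬ k <+: a) (h2 : ¬ a <+: k)
    (u : List Char) : ¬ k <+: a ++ u :=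
  fun h => (pv_prefix_append_cases h).elim h1 h2

lemma pv_isPrefixOf_false {k s : List Char} (h : ¬ k <+: s) : k.isPrefixOf s = false := by
  rw [Bool.eq_false_iff]
  simpa [List.isPrefixOf_iff_prefix] using h

lemma pv_isPrefixOf_true {k s : List Char} (h : k <+: s) : k.isPrefixOf s = true := by
  simpa [List.isPrefixOf_iff_prefix] using h

lemma pv_len_corr : ("correlation" : String).toList.length = 11 := by decide
lemma pv_len_rob : ("robability" : String).toList.length = 10 := by decide
lemma pv_len_prob : ("probability" : String).toList.length = 11 := by decide

-- pvRepl "probability" over the scan of the first four rules = scan with the pattern rule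
lemma pv_step5 : ∀ s, pvRepl "probability".toList "chance".toList (pvSC pvR4 s) = pvSC pvR6 s := by
  intro s
  induction hn : s.length using Nat.strong_induction_on generalizing s with
  | _ n ih =>
  cases hf : pvFindRule pvR4 s with
  | some p =>
    obtain ⟨hmem, hpre⟩ := pv_find_mem_pred hf
    have hsne : s ≠ [] := by
      intro hEq
      subst hEq
      exact (by decide : ∀ q ∈ pvR4, q.1.toList ≠ []) p hmem (List.prefix_nil.mp hpre)
    by_cases hcorr : p = ("correlation", "relationship")
    · subst hcorr
      obtain ⟨t, rfl⟩ := hpre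
      by_cases hrob : ("robability" : String).toList <+: t
      · obtain ⟨v, rfl⟩ := hrob
        rw [pvSC_match pvR4 (by decide) hf hsne]
        show pvRepl _ _ (_ ++ pvSC pvR4 (List.drop _ _)) = _
        rw [List.drop_left]
        rw [pvSC_append pvR4 (by decide) ("robability" : String).toList v (by decide)]
        rw [← List.append_assoc,
          show ("relationship" : String).toList ++ ("robability" : String).toList =
            ("relationshi" : String).toList ++ ("probability" : String).toList by decide,
          List.append_assoc]
        rw [pvRepl_append _ _ ("relationshi" : String).toList _ (by
          intro a₂ ha₂ hane hk
          rcases pv_prefix_append_cases hk with h1 | h1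
          · exact (by decide : ∀ a₂ ∈ ("relationshi" : String).toList.tails, a₂ ≠ [] →
                ¬ ("probability" : String).toList <+: a₂) a₂ ha₂ hane h1
          · exact (by decide : ∀ a₂ ∈ ("relationshi" : String).toList.tails, a₂ ≠ [] →
                ¬ a₂ <+: ("probability" : String).toList) a₂ ha₂ hane h1)]
        rw [pvRepl_head _ _ _ (by decide)]
        have hsplit : ("correlation" : String).toList ++ (("robability" : String).toList ++ v) =
            ("correlationrobability" : String).toList ++ v := by
          rw [← List.append_assoc]
          congr 1
        have hfind6 : pvFindRule pvR6
            (("correlation" : String).toList ++ (("robability" : String).toList ++ v)) =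
            some ("correlationrobability", "relationshichance") := by
          rw [hsplit]
          have h1 : ("algorithm" : String).toList.isPrefixOf
              (("correlationrobability" : String).toList ++ v) = false :=
            pv_isPrefixOf_false (pv_not_prefix_append (by decide) (by decide) v)
          have h2 : ("optimize" : String).toList.isPrefixOf
              (("correlationrobability" : String).toList ++ v) = false :=
            pv_isPrefixOf_false (pv_not_prefix_append (by decide) (by decide) v)
          have h3 : ("parameter" : String).toList.isPrefixOf
              (("correlationrobability" : String).toList ++ v) = false :=
            pv_isPrefixOf_false (pv_not_prefix_append (by decide) (by decide) v)
          have h4 : ("correlationrobability" : String).toList.isPrefixOf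
              (("correlationrobability" : String).toList ++ v) = true :=
            pv_isPrefixOf_true (List.prefix_append _ _)
          simp only [pvFindRule, pvR6, pvR3, List.cons_append, List.nil_append,
            List.find?_cons, h1, h2, h3, h4, cond_false, cond_true]
        rw [pvSC_match pvR6 (by decide) hfind6 hsne]
        show _ = _ ++ pvSC pvR6 (List.drop _ _)
        rw [hsplit, List.drop_left]
        rw [ih v.length (by
          subst hn
          simp only [List.length_append, pv_len_corr, pv_len_rob]
          omega) v rfl]
        rw [← List.append_assoc]
        congr 1
      · rw [pvSC_match pvR4 (by decide) hf hsne]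
        show pvRepl _ _ (_ ++ pvSC pvR4 (List.drop _ _)) = _
        rw [List.drop_left]
        rw [pvRepl_append _ _ ("relationship" : String).toList _ (by
          intro a₂ ha₂ hane hk
          rcases pv_prefix_append_cases hk with h1 | h1
          · exact (by decide : ∀ a₂ ∈ ("relationship" : String).toList.tails, a₂ ≠ [] →
                ¬ ("probability" : String).toList <+: a₂) a₂ ha₂ hane h1
          · have ha2 : a₂ = ['p'] :=
              (by decide : ∀ a₂ ∈ ("relationship" : String).toList.tails, a₂ ≠ [] →
                a₂ <+: ("probability" : String).toList → a₂ = ['p']) a₂ ha₂ hane h1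
            subst ha2
            have hd : ("probability" : String).toList.drop 1 <+: pvSC pvR4 t := by
              have hsplit : (['p'] : List Char) ++ ("probability" : String).toList.drop 1 =
                  ("probability" : String).toList := by decide
              rw [← hsplit] at hk
              exact (List.prefix_append_right_inj ['p']).mp hk
            have := pvSC_prefix_lift pvR4 (by decide) ("probability" : String).toList
              (by decide) t _ (by decide) (by decide) (by decide) hd
            exact hrob (by simpa using this))]
        have hfind6 : pvFindRule pvR6 (("correlation" : String).toList ++ t) =
            some ("correlation", "relationship") := by
          have h1 : ("algorithm" : String).toList.isPrefixOf
              (("correlation" : String).toList ++ t) = false :=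
            pv_isPrefixOf_false (pv_not_prefix_append (by decide) (by decide) t)
          have h2 : ("optimize" : String).toList.isPrefixOf
              (("correlation" : String).toList ++ t) = false :=
            pv_isPrefixOf_false (pv_not_prefix_append (by decide) (by decide) t)
          have h3 : ("parameter" : String).toList.isPrefixOf
              (("correlation" : String).toList ++ t) = false :=
            pv_isPrefixOf_false (pv_not_prefix_append (by decide) (by decide) t)
          have h4 : ("correlationrobability" : String).toList.isPrefixOf
              (("correlation" : String).toList ++ t) = false := by
            apply pv_isPrefixOf_false
            intro hp
            apply hrob
            have hsplit2 : ("correlationrobability" : String).toList =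
                ("correlation" : String).toList ++ ("robability" : String).toList := by decide
            rw [hsplit2] at hp
            exact (List.prefix_append_right_inj _).mp hp
          have h5 : ("correlation" : String).toList.isPrefixOf
              (("correlation" : String).toList ++ t) = true :=
            pv_isPrefixOf_true (List.prefix_append _ _)
          simp only [pvFindRule, pvR6, pvR3, List.cons_append, List.nil_append,
            List.find?_cons, h1, h2, h3, h4, h5, cond_false, cond_true]
        rw [pvSC_match pvR6 (by decide) hfind6 hsne]
        show _ = _ ++ pvSC pvR6 (List.drop _ _)
        rw [List.drop_left]
        congr 1
        exact ih t.length (by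
          subst hn
          simp only [List.length_append, pv_len_corr]
          omega) t rfl
    · have hmem3 : p ∈ pvR3 := by
        rw [pvR4] at hmem
        rcases List.mem_append.mp hmem with h | h
        · exact h
        · exact absurd (by simpa using h) hcorr
      obtain ⟨t, rfl⟩ := hpre
      have hfind3 : pvFindRule pvR3 (p.1.toList ++ t) = some p := by
        have := hf
        rw [pvFindRule, pvR4, List.find?_append] at this
        cases h3 : List.find? (fun q => q.1.toList.isPrefixOf (p.1.toList ++ t)) pvR3 with
        | some q =>
          rw [pvFindRule, h3]
          rw [h3] at this
          simpa using this
        | none =>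
          rw [h3] at this
          simp only [Option.none_or] at this
          have hq := List.mem_of_find?_eq_some this
          simp only [List.mem_singleton] at hq
          exact absurd hq hcorr
      have hfind6 : pvFindRule pvR6 (p.1.toList ++ t) = some p := by
        rw [pvFindRule, pvR6, List.find?_append]
        rw [pvFindRule] at hfind3
        rw [hfind3]
        rfl
      rw [pvSC_match pvR4 (by decide) hf hsne, pvSC_match pvR6 (by decide) hfind6 hsne]
      rw [List.drop_left]
      rw [pvRepl_append _ _ p.2.toList _ (by
        intro a₂ ha₂ hane hk
        rcases pv_prefix_append_cases hk with h1 | h1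
        · exact (by decide : ∀ q ∈ pvR3, ∀ a₂ ∈ q.2.toList.tails, a₂ ≠ [] →
              ¬ ("probability" : String).toList <+: a₂) p hmem3 a₂ ha₂ hane h1
        · exact (by decide : ∀ q ∈ pvR3, ∀ a₂ ∈ q.2.toList.tails, a₂ ≠ [] →
              ¬ a₂ <+: ("probability" : String).toList) p hmem3 a₂ ha₂ hane h1)]
      congr 1
      have hkpos : 0 < p.1.toList.length :=
        List.length_pos_iff.mpr ((by decide : ∀ q ∈ pvR3, q.1.toList ≠ []) p hmem3)
      exact ih t.length (by subst hn; simp only [List.length_append]; omega) t rfl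
  | none =>
    have hnone : ∀ q ∈ pvR4, ¬ (q.1.toList <+: s) := by
      intro q hq hp
      rw [pvFindRule, List.find?_eq_none] at hf
      exact hf q hq (pv_isPrefixOf_true hp)
    by_cases hprob : ("probability" : String).toList <+: s
    · obtain ⟨t, rfl⟩ := hprob
      rw [pvSC_append pvR4 (by decide) ("probability" : String).toList t (by decide)]
      rw [pvRepl_head _ _ _ (by decide)]
      have hfind6 : pvFindRule pvR6 (("probability" : String).toList ++ t) =
          some ("probability", "chance") := by
        have h1 : ("algorithm" : String).toList.isPrefixOf
            (("probability" : String).toList ++ t) = false :=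
          pv_isPrefixOf_false (pv_not_prefix_append (by decide) (by decide) t)
        have h2 : ("optimize" : String).toList.isPrefixOf
            (("probability" : String).toList ++ t) = false :=
          pv_isPrefixOf_false (pv_not_prefix_append (by decide) (by decide) t)
        have h3 : ("parameter" : String).toList.isPrefixOf
            (("probability" : String).toList ++ t) = false :=
          pv_isPrefixOf_false (pv_not_prefix_append (by decide) (by decide) t)
        have h4 : ("correlationrobability" : String).toList.isPrefixOf
            (("probability" : String).toList ++ t) = false :=
          pv_isPrefixOf_false (pv_not_prefix_append (by decide) (by decide) t)
        have h5 : ("correlation" : String).toList.isPrefixOf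
            (("probability" : String).toList ++ t) = false :=
          pv_isPrefixOf_false (pv_not_prefix_append (by decide) (by decide) t)
        have h6 : ("probability" : String).toList.isPrefixOf
            (("probability" : String).toList ++ t) = true :=
          pv_isPrefixOf_true (List.prefix_append _ _)
        simp only [pvFindRule, pvR6, pvR3, List.cons_append, List.nil_append,
          List.find?_cons, h1, h2, h3, h4, h5, h6, cond_false, cond_true]
      rw [pvSC_match pvR6 (by decide) hfind6 (by simp)]
      rw [List.drop_left]
      congr 1
      exact ih t.length (by
        subst hn
        simp only [List.length_append, pv_len_prob]
        omega) t rfl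
    · cases s with
      | nil => simp [pvSC, pvScan, pvRepl]
      | cons c t =>
        have hfind6 : pvFindRule pvR6 (c :: t) = none := by
          rw [pvFindRule, List.find?_eq_none]
          intro q hq
          simp only [List.isPrefixOf_iff_prefix, Bool.not_eq_true, decide_eq_false_iff_not]
          rw [pvR6, pvR3] at hq
          simp only [List.mem_cons, List.mem_append, List.mem_singleton,
            List.not_mem_nil, or_false] at hq
          rcases hq with ((rfl | rfl | rfl) | rfl | rfl | rfl)
          · exact hnone _ (by decide)
          · exact hnone _ (by decide)
          · exact hnone _ (by decide)
          · intro hp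
            apply hnone ("correlation", "relationship") (by decide)
            have hsplit2 : ("correlationrobability" : String).toList =
                ("correlation" : String).toList ++ ("robability" : String).toList := by decide
            rw [hsplit2] at hp
            exact (List.prefix_append _ _).trans hp
          · exact hnone _ (by decide)
          · exact hprob
        rw [pvSC_nomatch pvR4 hf, pvSC_nomatch pvR6 hfind6, pvRepl, dif_neg ?nopre]
        case nopre =>
          rintro ⟨-, hp⟩
          rw [List.isPrefixOf_iff_prefix] at hp
          have hk : ("probability" : String).toList = 'p' :: ("robability" : String).toList := by
            decide
          rw [hk, List.cons_prefix_cons] at hp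
          obtain ⟨rfl, hw⟩ := hp
          have := pvSC_prefix_lift pvR4 (by decide) ("probability" : String).toList
            (by decide) t ("robability" : String).toList (by decide) (by decide) (by decide) hw
          exact hprob (by rw [hk]; exact List.cons_prefix_cons.mpr ⟨rfl, this⟩)
        simp only [List.cons.injEq, true_and]
        exact ih t.length (by simp [← hn]) t rfl

lemma pv_crit_trivial (ps : List (String × String)) (ki : String)
    (h : ∀ p ∈ ps, ∀ a ∈ p.2.toList.tails, a ≠ [] → ¬ (a <+: ki.toList)) :
    ∀ p ∈ ps, ∀ t, (fun _ : List Char => True) (p.1.toList ++ t) →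
      ∀ a ∈ p.2.toList.tails, a ≠ [] → a <+: ki.toList →
      ¬ (ki.toList.drop a.length <+: t) :=
  fun p hp _ _ a ha hane hapre _ => absurd hapre (h p hp a ha hane)

lemma pv_main8 (e : String) : (simplify_jargon_py e).toList = pvSC pvRules8 e.toList := by
  have hA : (simplify_jargon_py e).toList =
      pvRepl "inference".toList "conclusion".toList (pvRepl "variance".toList "variation".toList
        (pvRepl "probability".toList "chance".toList (pvRepl "correlation".toList "relationship".toList
          (pvRepl "parameter".toList "setting".toList (pvRepl "optimize".toList "improve".toList
            (pvRepl "algorithm".toList "method".toList e.toList)))))) := by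
    show (PySem.Str.replace (PySem.Str.replace (PySem.Str.replace (PySem.Str.replace
      (PySem.Str.replace (PySem.Str.replace (PySem.Str.replace e
        "algorithm" "method") "optimize" "improve") "parameter" "setting")
        "correlation" "relationship") "probability" "chance") "variance" "variation")
        "inference" "conclusion").toList = _
    simp only [PySem.Str.toList_replace]
    rw [pv_replace_eq_pvRepl _ _ _ (by decide), pv_replace_eq_pvRepl _ _ _ (by decide),
      pv_replace_eq_pvRepl _ _ _ (by decide), pv_replace_eq_pvRepl _ _ _ (by decide),
      pv_replace_eq_pvRepl _ _ _ (by decide), pv_replace_eq_pvRepl _ _ _ (by decide),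
      pv_replace_eq_pvRepl _ _ _ (by decide)]
  rw [hA]
  have h1 := pv_step [] "algorithm" "method" (fun _ => True) (by decide) (by simp)
    (fun _ _ _ _ => trivial) (by simp) (by simp) (by simp)
    (pv_crit_trivial _ _ (by simp)) e.toList trivial
  rw [pvSC_nilrules] at h1
  have h2 := pv_step [("algorithm", "method")] "optimize" "improve" (fun _ => True)
    (by decide) (by decide) (fun _ _ _ _ => trivial) (by decide) (by decide) (by decide)
    (pv_crit_trivial _ _ (by decide)) e.toList trivial
  have h3 := pv_step [("algorithm", "method"), ("optimize", "improve")] "parameter" "setting"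
    (fun _ => True) (by decide) (by decide) (fun _ _ _ _ => trivial) (by decide) (by decide)
    (by decide) (pv_crit_trivial _ _ (by decide)) e.toList trivial
  have h4 := pv_step [("algorithm", "method"), ("optimize", "improve"),
      ("parameter", "setting")] "correlation" "relationship"
    (fun _ => True) (by decide) (by decide) (fun _ _ _ _ => trivial) (by decide) (by decide)
    (by decide) (pv_crit_trivial _ _ (by decide)) e.toList trivial
  have h5 := pv_step5 e.toList
  have h6 := pv_step pvR6 "variance" "variation" (fun _ => True) (by decide) (by decide)
    (fun _ _ _ _ => trivial) (by decide) (by decide) (by decide)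
    (pv_crit_trivial _ _ (by decide)) e.toList trivial
  have h7 := pv_step (pvR6 ++ [("variance", "variation")]) "inference" "conclusion"
    (fun _ => True) (by decide) (by decide) (fun _ _ _ _ => trivial) (by decide) (by decide)
    (by decide) (pv_crit_trivial _ _ (by decide)) e.toList trivial
  simp only [pvR6, pvR4, pvR3, pvRules8, List.cons_append, List.nil_append] at h1 h2 h3 h4 h5 h6 h7 ⊢
  rw [h1, h2, h3, h4, h5, h6, h7]

lemma pv_infix_drop {l s : List Char} (n : Nat) (h : l <:+: s.drop n) : l <:+: s :=
  h.trans (List.drop_suffix n s).isInfix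

lemma pv_rules_split : pvRules = pvR3 ++ [("correlation", "relationship"),
    ("probability", "chance"), ("variance", "variation"), ("inference", "conclusion")] := by
  decide

lemma pv_rules8_split : pvRules8 = pvR3 ++ (("correlationrobability", "relationshichance") ::
    [("correlation", "relationship"), ("probability", "chance"),
     ("variance", "variation"), ("inference", "conclusion")]) := by
  decide

lemma pv_find8_of_find7 {s : List Char} {p : String × String} (hpat : ¬ pvPat <+: s)
    (h : pvFindRule pvRules s = some p) : pvFindRule pvRules8 s = some p := by
  rw [pvFindRule, pv_rules_split, List.find?_append] at h
  rw [pvFindRule, pv_rules8_split, List.find?_append]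
  cases h3 : List.find? (fun q => q.1.toList.isPrefixOf s) pvR3 with
  | some q =>
    rw [h3] at h
    simpa using h
  | none =>
    rw [h3] at h
    simp only [Option.none_or] at h ⊢
    rw [List.find?_cons_of_neg (by
      show ¬ (("correlationrobability" : String).toList.isPrefixOf s) = true
      rw [pv_isPrefixOf_false (by exact hpat)]
      simp)]
    exact h

lemma pv_find8_none {s : List Char} (hpat : ¬ pvPat <+: s)
    (h : pvFindRule pvRules s = none) : pvFindRule pvRules8 s = none := by
  rw [pvFindRule, List.find?_eq_none] at h ⊢
  intro q hq
  rw [pv_rules8_split] at hq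
  rcases List.mem_append.mp hq with h1 | h1
  · exact h q (by rw [pv_rules_split]; exact List.mem_append.mpr (Or.inl h1))
  · rcases List.mem_cons.mp h1 with rfl | h2
    · simpa [List.isPrefixOf_iff_prefix] using hpat
    · exact h q (by rw [pv_rules_split]; exact List.mem_append.mpr (Or.inr h2))

lemma pv_scan8_eq_scan7 : ∀ s, ¬ (pvPat <:+: s) → pvSC pvRules8 s = pvSC pvRules s := by
  intro s
  induction hn : s.length using Nat.strong_induction_on generalizing s with
  | _ n ih =>
  intro hpat
  cases hf7 : pvFindRule pvRules s with
  | some p =>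
    have hf8 := pv_find8_of_find7 (fun h => hpat h.isInfix) hf7
    obtain ⟨hmem, hpre⟩ := pv_find_mem_pred hf7
    have hsne : s ≠ [] := by
      intro hEq
      subst hEq
      exact (by decide : ∀ q ∈ pvRules, q.1.toList ≠ []) p hmem (List.prefix_nil.mp hpre)
    rw [pvSC_match pvRules8 (by decide) hf8 hsne, pvSC_match pvRules (by decide) hf7 hsne]
    congr 1
    have hkpos : 0 < p.1.toList.length :=
      List.length_pos_iff.mpr ((by decide : ∀ q ∈ pvRules, q.1.toList ≠ []) p hmem)
    have hspos : 0 < s.length := List.length_pos_iff.mpr hsne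
    exact ih _ (by subst hn; simp only [List.length_drop]; omega) _ rfl
      (fun h => hpat (pv_infix_drop _ h))
  | none =>
    cases s with
    | nil => rfl
    | cons c t =>
      have hf8 := pv_find8_none (fun h => hpat h.isInfix) hf7
      rw [pvSC_nomatch pvRules8 hf8, pvSC_nomatch pvRules hf7]
      simp only [List.cons.injEq, true_and]
      exact ih t.length (by simp [← hn]) t rfl (fun h => hpat (List.infix_cons h))

lemma pv_char11_left (X : List Char) :
    (("relationshichance" : String).toList ++ X)[11]? = some 'c' := by
  rw [List.getElem?_append_left (by decide)]
  decide

lemma pv_char11_right (X : List Char) :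
    (("relationship" : String).toList ++ X)[11]? = some 'p' := by
  rw [List.getElem?_append_left (by decide)]
  decide

lemma pv_tight : ∀ s, pvPat <:+: s → pvSC pvRules8 s ≠ pvSC pvRules s := by
  intro s
  induction hn : s.length using Nat.strong_induction_on generalizing s with
  | _ n ih =>
  intro hinf
  by_cases hp : pvPat <+: s
  · obtain ⟨v, rfl⟩ := hp
    have hf8 : pvFindRule pvRules8 (pvPat ++ v) =
        some ("correlationrobability", "relationshichance") := by
      have h1 : ("algorithm" : String).toList.isPrefixOf (pvPat ++ v) = false :=
        pv_isPrefixOf_false (pv_not_prefix_append (by decide) (by decide) v)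
      have h2 : ("optimize" : String).toList.isPrefixOf (pvPat ++ v) = false :=
        pv_isPrefixOf_false (pv_not_prefix_append (by decide) (by decide) v)
      have h3 : ("parameter" : String).toList.isPrefixOf (pvPat ++ v) = false :=
        pv_isPrefixOf_false (pv_not_prefix_append (by decide) (by decide) v)
      have h4 : ("correlationrobability" : String).toList.isPrefixOf (pvPat ++ v) = true :=
        pv_isPrefixOf_true (List.prefix_append _ _)
      simp only [pvFindRule, pvRules8, pvR3, List.cons_append, List.nil_append,
        List.find?_cons, h1, h2, h3, h4, cond_false, cond_true]
    have hf7 : pvFindRule pvRules (pvPat ++ v) = some ("correlation", "relationship") := by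
      have h1 : ("algorithm" : String).toList.isPrefixOf (pvPat ++ v) = false :=
        pv_isPrefixOf_false (pv_not_prefix_append (by decide) (by decide) v)
      have h2 : ("optimize" : String).toList.isPrefixOf (pvPat ++ v) = false :=
        pv_isPrefixOf_false (pv_not_prefix_append (by decide) (by decide) v)
      have h3 : ("parameter" : String).toList.isPrefixOf (pvPat ++ v) = false :=
        pv_isPrefixOf_false (pv_not_prefix_append (by decide) (by decide) v)
      have h4 : ("correlation" : String).toList.isPrefixOf (pvPat ++ v) = true :=
        pv_isPrefixOf_true ((by decide : ("correlation" : String).toList <+: pvPat).trans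
          (List.prefix_append _ _))
      simp only [pvFindRule, pvRules, List.find?_cons, h1, h2, h3, h4, cond_false, cond_true]
    have hvne : pvPat ++ v ≠ [] := by simp [pvPat]
    rw [pvSC_match pvRules8 (by decide) hf8 hvne, pvSC_match pvRules (by decide) hf7 hvne]
    rw [show (pvPat ++ v).drop ("correlationrobability" : String).toList.length = v from
      List.drop_left]
    rw [show pvPat ++ v = ("correlation" : String).toList ++
        (("robability" : String).toList ++ v) by rw [← List.append_assoc]; rfl]
    rw [show (("correlation" : String).toList ++ (("robability" : String).toList ++ v)).drop
        ("correlation" : String).toList.length = ("robability" : String).toList ++ v from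
      List.drop_left]
    rw [pvSC_append pvRules (by decide) ("robability" : String).toList v (by decide)]
    intro hEq
    have h11 := congrArg (fun l => l[11]?) hEq
    simp only at h11
    rw [pv_char11_left, pv_char11_right] at h11
    simp at h11
  · have hsne : s ≠ [] := by
      intro hEq
      subst hEq
      rw [List.infix_nil] at hinf
      exact (by decide : pvPat ≠ []) hinf
    cases s with
    | nil => exact absurd rfl hsne
    | cons c t =>
      have hpt : pvPat <:+: t := (List.infix_cons_iff.mp hinf).resolve_left hp
      cases hf7 : pvFindRule pvRules (c :: t) with
      | none =>
        have hf8 := pv_find8_none hp hf7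
        rw [pvSC_nomatch pvRules8 hf8, pvSC_nomatch pvRules hf7]
        intro hEq
        exact ih t.length (by simp [← hn]) t rfl hpt
          ((List.cons.injEq _ _ _ _).mp hEq).2
      | some p =>
        have hf8 := pv_find8_of_find7 hp hf7
        obtain ⟨hmem, hpre⟩ := pv_find_mem_pred hf7
        obtain ⟨t', hsplit⟩ := hpre
        have hpt' : pvPat <:+: (c :: t).drop p.1.toList.length := by
          rw [← hsplit, List.drop_left]
          obtain ⟨u, v, huv⟩ := hinf
          have hune : u ≠ [] := by
            rintro rfl
            exact hp ⟨v, by simpa using huv⟩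
          have hupos : 0 < u.length := List.length_pos_iff.mpr hune
          rw [← hsplit] at huv
          rcases Nat.lt_or_ge u.length p.1.toList.length with hlt | hle
          · exfalso
            have hdrop := congrArg (List.drop u.length) huv
            rw [List.append_assoc, List.drop_left,
              List.drop_append_of_le_length (le_of_lt hlt)] at hdrop
            have hgpre : p.1.toList.drop u.length <+: pvPat := by
              rcases pv_prefix_append_cases ⟨t', hdrop.symm⟩ with h1 | h1
              · exact h1
              · exfalso
                have hlen := h1.length_le
                have hklen : p.1.toList.length ≤ 12 :=
                  (by decide : ∀ q ∈ pvRules, q.1.toList.length ≤ 12) p hmem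
                have hplen : pvPat.length = 21 := by decide
                simp only [List.length_drop] at hlen
                omega
            have hgmem : p.1.toList.drop u.length ∈ p.1.toList.tails :=
              (List.mem_tails _ _).mpr (List.drop_suffix _ _)
            have hgne : p.1.toList.drop u.length ≠ [] := by
              rw [ne_eq, List.drop_eq_nil_iff]
              have : u.length < p.1.toList.length := hlt
              omega
            have hgnek : p.1.toList.drop u.length ≠ p.1.toList := by
              intro hEq2
              have := congrArg List.length hEq2
              rw [List.length_drop] at this
              have hkpos : 0 < p.1.toList.length :=
                List.length_pos_iff.mpr ((by decide : ∀ q ∈ pvRules, q.1.toList ≠ []) p hmem)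
              omega
            exact (by decide : ∀ q ∈ pvRules, ∀ g ∈ q.1.toList.tails, g ≠ [] →
              g ≠ q.1.toList → ¬ g <+: pvPat) p hmem _ hgmem hgne hgnek hgpre
          · have hdrop := congrArg (List.drop p.1.toList.length) huv
            rw [List.append_assoc, List.drop_append_of_le_length hle,
              List.drop_left] at hdrop
            exact ⟨u.drop p.1.toList.length, v, by rw [List.append_assoc]; exact hdrop⟩
        rw [pvSC_match pvRules8 (by decide) hf8 (by simp), pvSC_match pvRules (by decide) hf7 (by simp)]
        intro hEq
        have hkpos : 0 < p.1.toList.length :=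
          List.length_pos_iff.mpr ((by decide : ∀ q ∈ pvRules, q.1.toList ≠ []) p hmem)
        exact ih ((c :: t).drop p.1.toList.length).length
          (by subst hn; simp only [List.length_drop, List.length_cons]; omega) _ rfl hpt'
          (List.append_cancel_left hEq)

-- ===== VERDICT (by name: the statement is the Claim_ definition above) =====
theorem simplify_jargon_py_spec : Claim_unchanged_simplify_jargon_py := by
  intro e _ hD
  have hG : ¬ (pvPat <:+: e.toList) := by
    rw [D_simplify_jargon_py, PySem.Str.isIn_iff_infix] at hD
    exact hD
  apply String.toList_inj.mp
  rw [pv_main8 e, pv_scan8_eq_scan7 e.toList hG]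
  show _ = (String.ofList (pvScan pvRules e.toList.length e.toList)).toList
  rw [String.toList_ofList]
  rfl

theorem simplify_jargon_py_changed : Claim_changed_simplify_jargon_py := by
  unfold Claim_changed_simplify_jargon_py; decide

theorem simplify_jargon_py_tight : Claim_exact_simplify_jargon_py := by
  intro e _ hD
  have hinf : pvPat <:+: e.toList := by
    rw [D_simplify_jargon_py, PySem.Str.isIn_iff_infix] at hD
    exact hD
  intro hEq
  have hTL := congrArg String.toList hEq
  rw [pv_main8 e] at hTL
  have halt : (simplify_jargon_py_alt e).toList = pvSC pvRules e.toList := by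
    show (String.ofList _).toList = _
    rw [String.toList_ofList]
    rfl
  rw [halt] at hTL
  exact pv_tight e.toList hinf hTL
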